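-- pv_equiv track=rewrite | github.com/pypi-data/pypi-mirror-69 | packages/cyMStools/cyMStools-0.0.5.tar.gz/cyMStools-0.0.5/cyMStools/plink2_summary.py | get_crosslink_site_info
-- ===== SOURCE A (Python) =====
-- def get_crosslink_site_info(site_table):
--     raw_name_list = []
--     for line in site_table[2:]:
--         line_list = line.rstrip("\n").split(",")
--         if line_list[0] == "":
--             raw_name = line_list[2].split(".")[0]
--             if raw_name not in raw_name_list:
--                 raw_name_list.append(raw_name)
--     raw_name_list.sort()
--     return raw_name_list
-- ===== SOURCE B (Python) =====
-- def get_crosslink_site_info(site_table):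
--     # Collect every matching raw name (duplicates kept), sort once,
--     # then drop adjacent duplicates in a single linear scan.
--     names = []
--     for line in site_table[2:]:
--         line_list = line.rstrip("\n").split(",")
--         if line_list[0] == "":
--             names.append(line_list[2].split(".")[0])
--     names.sort()
--     result = []
--     for name in names:
--         if not result or result[-1] != name:
--             result.append(name)
--     return result
-- ===== Notes on version B (the rewrite author's own statement) =====
-- stated objective: alternative
-- what changed: B collects all matching raw names with duplicates (no in-loop membership scan), sorts once, and removes duplicates in a single adjacent-comparison pass over the sorted list, instead of A's quadratic not-in membership dedup before sorting.
import Mathlib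
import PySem

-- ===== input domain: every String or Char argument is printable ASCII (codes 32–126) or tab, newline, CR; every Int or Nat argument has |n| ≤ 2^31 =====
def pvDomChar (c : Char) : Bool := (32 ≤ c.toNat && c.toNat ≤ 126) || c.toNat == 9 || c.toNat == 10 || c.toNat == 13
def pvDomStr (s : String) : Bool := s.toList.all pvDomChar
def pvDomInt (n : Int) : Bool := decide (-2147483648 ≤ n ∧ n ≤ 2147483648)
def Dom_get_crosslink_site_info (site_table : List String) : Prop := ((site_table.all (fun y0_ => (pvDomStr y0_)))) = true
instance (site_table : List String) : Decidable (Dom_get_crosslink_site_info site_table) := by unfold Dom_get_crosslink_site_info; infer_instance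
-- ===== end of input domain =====

-- B replaces A's in-loop 'not in' membership dedup (before the sort) by collect-all,
-- sort once, then a single adjacent-comparison dedup pass over the sorted list.

-- line.rstrip("\n"): drop all trailing '\n' characters (hand port, exact)
def pvRstripNl (s : List Char) : List Char := (s.reverse.dropWhile (· == '\n')).reverse

-- shared per-line parsing (identical in both Python sources):
-- line.rstrip("\n").split(","); if first field is "", yield line_list[2].split(".")[0]
-- (line_list[2] defaults to "" where Python would raise IndexError; those inputs are outside Pre_)
def pvRawName? (line : String) : Option String :=
  let line_list := PySem.Chars.splitOn (pvRstripNl line.toList) [',']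
  if line_list.headD [] = ([] : List Char) then
    some (String.ofList ((PySem.Chars.splitOn ((PySem.List.pyGet? line_list 2).getD []) ['.']).headD []))
  else none

-- ===== PORT A =====
def get_crosslink_site_info (site_table : List String) : List String :=
  let raw_name_list := (PySem.List.slice site_table (some 2) none).foldl
    (fun acc line =>
      match pvRawName? line with
      | some raw_name => if raw_name ∈ acc then acc else acc ++ [raw_name]
      | none => acc) []
  PySem.List.sorted raw_name_list (fun x => x)

-- ===== PORT B =====
-- adjacent-dedup step: append name only when it differs from the last appended element
def pvAdjStep (res : List String) (name : String) : List String :=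
  if res = [] ∨ res.getLast? ≠ some name then res ++ [name] else res

def get_crosslink_site_info_alt (site_table : List String) : List String :=
  let names := (PySem.List.slice site_table (some 2) none).foldl
    (fun acc line =>
      match pvRawName? line with
      | some r => acc ++ [r]
      | none => acc) []
  (PySem.List.sorted names (fun x => x)).foldl pvAdjStep []

-- ===== PRECONDITION & SPEC =====
-- Pre_ excludes exactly the rows on which Python raises IndexError at line_list[2]:
-- a data row (beyond the two headers) whose first comma field is empty but which has
-- fewer than three comma fields.
def Pre_get_crosslink_site_info (site_table : List String) : Prop :=
  ∀ line ∈ site_table.drop 2,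
    (PySem.Chars.splitOn (pvRstripNl line.toList) [',']).headD [] = ([] : List Char) →
    3 ≤ (PySem.Chars.splitOn (pvRstripNl line.toList) [',']).length
instance (site_table : List String) : Decidable (Pre_get_crosslink_site_info site_table) := by
  unfold Pre_get_crosslink_site_info; infer_instance
def pvWitness_get_crosslink_site_info : List String :=
  ["header1", "header2", ",x,run1.raw", "skip,y,z", ",x,run1.raw2", ",q,alpha.raw"]

def Spec_get_crosslink_site_info (site_table : List String) (out : List String) : Prop := out = get_crosslink_site_info_alt site_table
instance (site_table : List String) (out : List String) : Decidable (Spec_get_crosslink_site_info site_table out) := by unfold Spec_get_crosslink_site_info; infer_instance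

-- ===== CLAIM (what is proved, stated in full; the proofs are below) =====
def Claim_equal_get_crosslink_site_info : Prop := ∀ (site_table : List String), Dom_get_crosslink_site_info site_table → Pre_get_crosslink_site_info site_table → Spec_get_crosslink_site_info site_table (get_crosslink_site_info site_table)

-- ===== LEMMAS AND PROOFS =====

-- A's dedup loop is the Set.add fold over the extracted-name list
theorem pvFoldA_eq (lines : List String) (acc : List String) :
    lines.foldl (fun acc line =>
      match pvRawName? line with
      | some raw_name => if raw_name ∈ acc then acc else acc ++ [raw_name]
      | none => acc) acc
    = (lines.filterMap pvRawName?).foldl PySem.Set.add acc := by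
  induction lines generalizing acc with
  | nil => rfl
  | cons l t ih =>
    simp only [List.foldl_cons, List.filterMap_cons]
    cases h : pvRawName? l with
    | none => simp [ih]
    | some r =>
      simp only [List.foldl_cons, ih]
      congr 1
      simp [PySem.Set.add, PySem.Set.contains]

-- B's collection loop is filterMap
theorem pvFoldB_eq (lines : List String) (acc : List String) :
    lines.foldl (fun acc line =>
      match pvRawName? line with
      | some r => acc ++ [r]
      | none => acc) acc
    = acc ++ lines.filterMap pvRawName? := by
  induction lines generalizing acc with
  | nil => simp
  | cons l t ih =>
    simp only [List.foldl_cons, List.filterMap_cons]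
    cases h : pvRawName? l with
    | none => simp [ih]
    | some r => simp [ih]

theorem pvLast_max (res : List String) (h : res.Pairwise (· < ·)) (b : String)
    (hb : res.getLast? = some b) : ∀ a ∈ res, a ≤ b := by
  induction res with
  | nil => simp at hb
  | cons x t ih =>
    intro a ha
    cases t with
    | nil =>
      simp at hb ha; subst hb; subst ha; exact le_refl _
    | cons y u =>
      rw [List.getLast?_cons_cons] at hb
      have ht : (y :: u).Pairwise (· < ·) := (List.pairwise_cons.mp h).2
      rcases List.mem_cons.mp ha with rfl | ha'
      · have hbmem : b ∈ y :: u := List.mem_of_getLast? hb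
        exact le_of_lt ((List.pairwise_cons.mp h).1 b hbmem)
      · exact ih ht hb a ha'

-- invariant of the adjacent-dedup pass
theorem pvAdj_inv (s : List String) (res : List String)
    (hs : s.Pairwise (· ≤ ·)) (hres : res.Pairwise (· < ·))
    (hlink : ∀ a, res.getLast? = some a → ∀ x ∈ s, a ≤ x) :
    (s.foldl pvAdjStep res).Pairwise (· < ·) ∧
      (∀ x, x ∈ s.foldl pvAdjStep res ↔ x ∈ res ∨ x ∈ s) := by
  induction s generalizing res with
  | nil => exact ⟨hres, by simp⟩
  | cons name t ih =>
    have hsc := List.pairwise_cons.mp hs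
    simp only [List.foldl_cons]
    by_cases hg : res = [] ∨ res.getLast? ≠ some name
    · have hstep : pvAdjStep res name = res ++ [name] := by
        simp [pvAdjStep, hg]
      rw [hstep]
      have hlt : ∀ a ∈ res, a < name := by
        intro a ha
        cases hlast : res.getLast? with
        | none => cases res with
          | nil => simp at ha
          | cons z w => simp at hlast
        | some b =>
          have hab : a ≤ b := pvLast_max res hres b hlast a ha
          have hbn : b ≤ name := hlink b hlast name (List.mem_cons_self)
          have hne : b ≠ name := by
            rcases hg with hnil | hne
            · subst hnil; simp at hlast
            · intro hEq; exact hne (hEq ▸ hlast)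
          exact lt_of_le_of_lt hab (lt_of_le_of_ne hbn hne)
      have hres' : (res ++ [name]).Pairwise (· < ·) := by
        rw [List.pairwise_append]
        exact ⟨hres, by simp, by simpa using hlt⟩
      have hlink' : ∀ a, (res ++ [name]).getLast? = some a → ∀ x ∈ t, a ≤ x := by
        intro a hla x hx
        simp [List.getLast?_append] at hla
        exact hla ▸ hsc.1 x hx
      obtain ⟨h1, h2⟩ := ih (res ++ [name]) hsc.2 hres' hlink'
      refine ⟨h1, fun x => ?_⟩
      rw [h2 x]
      simp [or_assoc, List.mem_append]
    · push_neg at hg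
      have hstep : pvAdjStep res name = res := by
        simp [pvAdjStep, hg.1, hg.2]
      rw [hstep]
      have hnameres : name ∈ res := by
        have := List.mem_of_getLast? hg.2
        exact this
      have hlink' : ∀ a, res.getLast? = some a → ∀ x ∈ t, a ≤ x := by
        intro a hla x hx
        rw [hg.2] at hla
        injection hla with hEq
        exact hEq ▸ hsc.1 x hx
      obtain ⟨h1, h2⟩ := ih res hsc.2 hres hlink'
      refine ⟨h1, fun x => ?_⟩
      rw [h2 x]
      constructor
      · rintro (h | h)
        · exact Or.inl h
        · exact Or.inr (List.mem_cons_of_mem _ h)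
      · rintro (h | h)
        · exact Or.inl h
        · rcases List.mem_cons.mp h with rfl | h'
          · exact Or.inl hnameres
          · exact Or.inr h'

-- ===== VERDICT (by name: the statement is the Claim_ definition above) =====
theorem get_crosslink_site_info_spec : Claim_equal_get_crosslink_site_info := by
  intro site_table _hdom _hpre
  unfold Spec_get_crosslink_site_info
  unfold get_crosslink_site_info get_crosslink_site_info_alt
  simp only [pvFoldA_eq, pvFoldB_eq, List.nil_append]
  set L := (PySem.List.slice site_table (some 2) none).filterMap pvRawName? with hL
  have hA : L.foldl PySem.Set.add [] = PySem.Set.ofList L :=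
    (PySem.Set.ofList_eq_foldl L).symm
  rw [hA]
  have hs := PySem.List.sorted_pairwise L (fun x => x)
  obtain ⟨hpw, hmem⟩ := pvAdj_inv (PySem.List.sorted L (fun x => x)) [] hs
    (by simp) (by simp)
  set out := (PySem.List.sorted L (fun x => x)).foldl pvAdjStep [] with hout
  have hnd : out.Nodup := hpw.imp ne_of_lt
  have hperm : out.Perm (PySem.Set.ofList L) := by
    rw [List.perm_ext_iff_of_nodup hnd (PySem.Set.nodup_ofList L)]
    intro a
    rw [hmem a, PySem.Set.mem_ofList]
    simp [PySem.List.mem_sorted]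
  exact (PySem.List.sorted_eq_of_perm_of_pairwise_lt (PySem.Set.ofList L) out (fun x => x) hperm hpw)
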